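-- pv_equiv track=rewrite | github.com/zaephyrz/SailScan | app/services/cve_service.py | _check_exploit_available
-- ===== SOURCE A (Python) =====
-- from typing import List, Dict, Any
--
-- def _check_exploit_available(cve_data: Dict) -> str:
--     """Check if exploit is available"""
--     # This could be enhanced with additional sources
--     references = cve_data.get("references", [])
--     exploit_keywords = ["exploit", "poc", "proof-of-concept", "metasploit"]
--
--     for ref in references:
--         tags = ref.get("tags", [])
--         if any(keyword in tag.lower() for keyword in exploit_keywords for tag in tags):
--             return "Yes"
--
--     return "Unknown"
-- ===== SOURCE B (Python) =====
-- def _check_exploit_available(cve_data):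
--     """Check if exploit is available"""
--     references = cve_data.get("references", [])
--     exploit_keywords = ["exploit", "poc", "proof-of-concept", "metasploit"]
--     text = " ".join(tag.lower() for ref in references for tag in ref.get("tags", []))
--     return "Yes" if any(kw in text for kw in exploit_keywords) else "Unknown"
-- ===== Notes on version B (the rewrite author's own statement) =====
-- stated objective: simpler
-- what changed: B flattens all tags of all references into one lowercased space-joined text blob and checks each keyword as a substring of that blob once, instead of A's per-reference loop with an early return over a keyword-by-tag generator; equivalence relies on no keyword containing a space.
import Mathlib
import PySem

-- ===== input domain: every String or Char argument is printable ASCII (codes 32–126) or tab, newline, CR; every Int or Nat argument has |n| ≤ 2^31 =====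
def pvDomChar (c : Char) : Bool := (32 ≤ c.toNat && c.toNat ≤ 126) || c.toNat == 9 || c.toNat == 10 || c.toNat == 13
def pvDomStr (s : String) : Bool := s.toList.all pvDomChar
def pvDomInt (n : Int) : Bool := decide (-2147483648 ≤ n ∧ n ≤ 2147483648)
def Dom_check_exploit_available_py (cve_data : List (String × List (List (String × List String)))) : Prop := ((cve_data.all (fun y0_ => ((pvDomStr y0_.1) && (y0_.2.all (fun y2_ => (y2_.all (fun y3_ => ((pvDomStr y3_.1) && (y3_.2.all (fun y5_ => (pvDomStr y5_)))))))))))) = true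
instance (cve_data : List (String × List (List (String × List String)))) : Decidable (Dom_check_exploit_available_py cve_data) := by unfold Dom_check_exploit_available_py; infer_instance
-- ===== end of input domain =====

-- B replaces A's per-reference loop (early return on a keyword-by-tag scan) by one lowercased
-- space-joined blob of all tags, checked for each keyword once; objective: simpler.


-- ===== PORT A =====
-- 'for ref in references: … return "Yes" … / return "Unknown"' as structural recursion
def pvRefsLoop (refs : List (List (String × List String))) : String :=
  match refs with
  | [] => "Unknown"
  | ref :: rest =>
    let tags := (PySem.Dict.mk ref).getD "tags" []
    if ["exploit", "poc", "proof-of-concept", "metasploit"].any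
         (fun keyword => tags.any (fun tag => PySem.Str.isIn keyword (PySem.Str.lower tag)))
    then "Yes" else pvRefsLoop rest

def check_exploit_available_py (cve_data : List (String × List (List (String × List String)))) : String :=
  let references := (PySem.Dict.mk cve_data).getD "references" []
  pvRefsLoop references

-- ===== PORT B =====
def check_exploit_available_py_alt (cve_data : List (String × List (List (String × List String)))) : String :=
  let references := (PySem.Dict.mk cve_data).getD "references" []
  let text := PySem.Str.join " "
    ((references.flatMap (fun ref => (PySem.Dict.mk ref).getD "tags" [])).map PySem.Str.lower)
  if ["exploit", "poc", "proof-of-concept", "metasploit"].any (fun kw => PySem.Str.isIn kw text)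
  then "Yes" else "Unknown"

-- ===== PRECONDITION & SPEC =====
def Spec_check_exploit_available_py (cve_data : List (String × List (List (String × List String)))) (out : String) : Prop := out = check_exploit_available_py_alt cve_data
instance (cve_data : List (String × List (List (String × List String)))) (out : String) : Decidable (Spec_check_exploit_available_py cve_data out) := by unfold Spec_check_exploit_available_py; infer_instance

-- ===== CLAIM (what is proved, stated in full; the proofs are below) =====
def Claim_equal_check_exploit_available_py : Prop := ∀ (cve_data : List (String × List (List (String × List String)))), Dom_check_exploit_available_py cve_data → Spec_check_exploit_available_py cve_data (check_exploit_available_py cve_data)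

-- ===== LEMMAS AND PROOFS =====

-- an occurrence of kw in a ++ c :: b with c ∉ kw lies entirely inside a or inside b
theorem pv_infix_append_cons_iff {α : Type} {c : α} {kw a b : List α} (hc : c ∉ kw) :
    kw <:+: (a ++ c :: b) ↔ kw <:+: a ∨ kw <:+: b := by
  constructor
  · rintro ⟨s, t, h⟩
    by_cases h1 : s.length + kw.length ≤ a.length
    · left
      have hs : s.length ≤ a.length := le_trans (Nat.le_add_right _ _) h1
      have hd : kw ++ t = a.drop s.length ++ c :: b := by
        have h' := congrArg (List.drop s.length) h
        rwa [List.append_assoc, List.drop_left, List.drop_append_of_le_length hs] at h'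
      have hpre : kw <+: a.drop s.length ++ c :: b := ⟨t, hd⟩
      have hlen : kw.length ≤ (a.drop s.length).length := by
        simp only [List.length_drop]; omega
      have heq := List.prefix_iff_eq_take.mp hpre
      rw [List.take_append_of_le_length hlen] at heq
      have hkw : kw <+: a.drop s.length := heq ▸ List.take_prefix _ _
      exact hkw.isInfix.trans (List.drop_suffix s.length a).isInfix
    by_cases h2 : s.length ≤ a.length
    · exfalso
      have hidx : (a ++ c :: b)[a.length]? = some c := by
        rw [List.getElem?_append_right (le_refl a.length)]; simp
      rw [← h, List.append_assoc, List.getElem?_append_right h2,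
        List.getElem?_append] at hidx
      rw [if_pos (by omega : a.length - s.length < kw.length)] at hidx
      exact hc (List.mem_of_getElem? hidx)
    · push Not at h2
      right
      have h' := congrArg (List.drop s.length) h
      rw [List.append_assoc, List.drop_left] at h'
      have hb : (a ++ c :: b).drop s.length = b.drop (s.length - a.length - 1) := by
        rw [show a ++ c :: b = (a ++ [c]) ++ b by simp, List.drop_append]
        have hnil : (a ++ [c]).drop s.length = [] := by
          apply List.drop_eq_nil_of_le; simp; omega
        rw [hnil]; simp [Nat.sub_sub]
      rw [hb] at h'
      have hkw : kw <+: b.drop (s.length - a.length - 1) := ⟨t, h'⟩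
      exact hkw.isInfix.trans (List.drop_suffix _ b).isInfix
  · rintro (h | h)
    · exact h.trans ⟨[], c :: b, by simp⟩
    · exact h.trans ⟨a ++ [c], [], by simp⟩

-- a space-free nonempty pattern is in the space-joined blob iff it is in one of the pieces
theorem pv_infix_join_iff {c : Char} {kw : List Char} (hne : kw ≠ []) (hc : c ∉ kw) :
    ∀ (L : List (List Char)), kw <:+: PySem.Chars.join [c] L ↔ ∃ p ∈ L, kw <:+: p := by
  intro L
  induction L with
  | nil => simp [PySem.Chars.join_nil, List.infix_nil, hne]
  | cons p rest ih =>
    cases rest with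
    | nil => simp [PySem.Chars.join_singleton]
    | cons q rest' =>
      rw [PySem.Chars.join_cons_cons, List.append_assoc, List.singleton_append,
        pv_infix_append_cons_iff hc, ih]
      simp only [List.mem_cons]
      constructor
      · rintro (h | ⟨x, hx, h⟩)
        · exact ⟨p, Or.inl rfl, h⟩
        · exact ⟨x, Or.inr hx, h⟩
      · rintro ⟨x, hx | hx, h⟩
        · exact Or.inl (hx ▸ h)
        · exact Or.inr ⟨x, hx, h⟩

theorem pv_keywords_ok : ∀ kw ∈ ["exploit", "poc", "proof-of-concept", "metasploit"],
    kw.toList ≠ [] ∧ ' ' ∉ kw.toList := by decide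

theorem pv_if_yes_or (x y : Bool) :
    (if x then "Yes" else (if y then "Yes" else "Unknown"))
      = (if (x || y) then "Yes" else "Unknown") := by
  cases x <;> simp

theorem pv_loop_eq (refs : List (List (String × List String))) :
    pvRefsLoop refs =
      if refs.any (fun ref => ["exploit", "poc", "proof-of-concept", "metasploit"].any
            (fun keyword => ((PySem.Dict.mk ref).getD "tags" []).any
              (fun tag => PySem.Str.isIn keyword (PySem.Str.lower tag))))
      then "Yes" else "Unknown" := by
  induction refs with
  | nil => rfl
  | cons ref rest ih =>
    rw [List.any_cons, ← pv_if_yes_or, ← ih]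
    rfl

-- ===== VERDICT (by name: the statement is the Claim_ definition above) =====
theorem check_exploit_available_py_spec : Claim_equal_check_exploit_available_py := by
  intro cve_data _
  unfold Spec_check_exploit_available_py check_exploit_available_py check_exploit_available_py_alt
  simp only
  set refs := (PySem.Dict.mk cve_data).getD "references" [] with hrefs
  rw [pv_loop_eq]
  have hb : (refs.any (fun ref => ["exploit", "poc", "proof-of-concept", "metasploit"].any
        (fun keyword => ((PySem.Dict.mk ref).getD "tags" []).any
          (fun tag => PySem.Str.isIn keyword (PySem.Str.lower tag)))))
      = (["exploit", "poc", "proof-of-concept", "metasploit"].any (fun kw => PySem.Str.isIn kw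
          (PySem.Str.join " "
            ((refs.flatMap (fun ref => (PySem.Dict.mk ref).getD "tags" [])).map PySem.Str.lower)))) := by
    rw [Bool.eq_iff_iff]
    simp only [List.any_eq_true]
    constructor
    · rintro ⟨ref, href, kw, hkw, tag, htag, hin⟩
      refine ⟨kw, hkw, ?_⟩
      rw [PySem.Str.isIn_iff_infix, PySem.Str.toList_join,
        show (" " : String).toList = [' '] from rfl, List.map_map,
        pv_infix_join_iff (pv_keywords_ok kw hkw).1 (pv_keywords_ok kw hkw).2]
      refine ⟨(PySem.Str.lower tag).toList, ?_, ?_⟩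
      · simp only [List.mem_map, Function.comp]
        exact ⟨tag, List.mem_flatMap.mpr ⟨ref, href, htag⟩, rfl⟩
      · exact (PySem.Str.isIn_iff_infix _ _).mp hin
    · rintro ⟨kw, hkw, hin⟩
      rw [PySem.Str.isIn_iff_infix, PySem.Str.toList_join,
        show (" " : String).toList = [' '] from rfl, List.map_map,
        pv_infix_join_iff (pv_keywords_ok kw hkw).1 (pv_keywords_ok kw hkw).2] at hin
      obtain ⟨p, hp, hinf⟩ := hin
      simp only [List.mem_map, Function.comp] at hp
      obtain ⟨tag, htag, rfl⟩ := hp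
      obtain ⟨ref, href, htag'⟩ := List.mem_flatMap.mp htag
      exact ⟨ref, href, kw, hkw, tag, htag', (PySem.Str.isIn_iff_infix _ _).mpr hinf⟩
  rw [hb]
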